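-- pv_equiv track=rewrite | github.com/vento277/IRIS | components/lib/listen.py | yes
-- ===== SOURCE A (Python) =====
-- def yes(text):
--     a = ['yes', 'sure', 'sure thing', 'ok', 'okay', 'roger that', 'yes please',
--          'good', 'perfect', 'fact', 'yeah', 'yup', 'yas', 'uh huh', 'it is', "it's"]  # can add as many as you want
--
--     text = text.lower()  # convert to all lower case
--
--     # Check is the users command include a wake phrase
--     for phrase in a:
--         if phrase in text:
--             return True
--
--     return False
-- ===== SOURCE B (Python) =====
-- PHRASES = frozenset(['yes', 'sure', 'sure thing', 'ok', 'okay', 'roger that', 'yes please',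
--                      'good', 'perfect', 'fact', 'yeah', 'yup', 'yas', 'uh huh', 'it is', "it's"])
-- LENGTHS = sorted({len(p) for p in PHRASES})
--
-- def yes(text):
--     t = text.lower()
--     n = len(t)
--     # for each position, look the candidate substrings (one per phrase length) up in a hash set
--     for i in range(n):
--         for L in LENGTHS:
--             if i + L <= n and t[i:i+L] in PHRASES:
--                 return True
--     return False
-- ===== Notes on version B (the rewrite author's own statement) =====
-- stated objective: alternative
-- what changed: A scans the whole text once per phrase with the substring operator; B builds a hash set of the phrases and the set of their distinct lengths once, then makes a single pass over positions, looking each fixed-length substring up in the set, so the inner scan over the phrase list disappears.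
import Mathlib
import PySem

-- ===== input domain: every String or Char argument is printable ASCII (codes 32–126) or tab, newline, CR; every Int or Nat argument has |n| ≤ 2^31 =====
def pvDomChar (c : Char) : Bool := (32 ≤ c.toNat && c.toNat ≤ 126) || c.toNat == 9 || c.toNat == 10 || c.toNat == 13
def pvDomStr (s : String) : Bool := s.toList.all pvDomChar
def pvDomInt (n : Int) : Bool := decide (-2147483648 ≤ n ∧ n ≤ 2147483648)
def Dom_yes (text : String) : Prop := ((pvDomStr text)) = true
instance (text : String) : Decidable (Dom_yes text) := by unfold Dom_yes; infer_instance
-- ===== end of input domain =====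

-- B replaces A's scan of the whole text once per phrase by a hash-set lookup of each
-- fixed-length substring at each position (alternative algorithm; not measured faster).

-- ===== PORT A =====
-- the literal phrase list `a` of A
def yesPhrasesA : List String :=
  ["yes", "sure", "sure thing", "ok", "okay", "roger that", "yes please",
   "good", "perfect", "fact", "yeah", "yup", "yas", "uh huh", "it is", "it's"]

def yes (text : String) : Bool :=
  let t := PySem.Str.lower text
  -- for phrase in a: if phrase in text: return True / return False
  yesPhrasesA.any (fun phrase => PySem.Str.isIn phrase t)

-- ===== PORT B =====
-- PHRASES = frozenset([...]); strings are modelled as their code-point lists (PySem.Chars side)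
def yesPhraseSet : PySem.Set (List Char) :=
  PySem.Set.ofList
    (["yes", "sure", "sure thing", "ok", "okay", "roger that", "yes please",
      "good", "perfect", "fact", "yeah", "yup", "yas", "uh huh", "it is", "it's"].map String.toList)

-- LENGTHS = sorted({len(p) for p in PHRASES})
def yesLengths : List Int :=
  PySem.List.sorted (PySem.Set.ofList (yesPhraseSet.map (fun p => (p.length : Int)))) (fun x => x) false

def yes_alt (text : String) : Bool :=
  let t := (PySem.Str.lower text).toList
  let n := t.length
  -- for i in range(n): for L in LENGTHS: if i + L <= n and t[i:i+L] in PHRASES: return True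
  (List.range n).any (fun i =>
    yesLengths.any (fun L =>
      decide ((i : Int) + L ≤ (n : Int)) &&
        PySem.Set.contains yesPhraseSet
          (PySem.Chars.slice t (some (i : Int)) (some ((i : Int) + L)))))

-- ===== PRECONDITION & SPEC =====
def Spec_yes (text : String) (out : Bool) : Prop := out = yes_alt text
instance (text : String) (out : Bool) : Decidable (Spec_yes text out) := by unfold Spec_yes; infer_instance

-- ===== CLAIM (what is proved, stated in full; the proofs are below) =====
def Claim_equal_yes : Prop := ∀ (text : String), Dom_yes text → Spec_yes text (yes text)

-- ===== LEMMAS AND PROOFS =====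

-- a nonempty list is an infix iff it is a prefix of some proper drop
theorem infix_iff_exists_drop {α : Type} (p l : List α) (h : p ≠ []) :
    p <:+: l ↔ ∃ i, i < l.length ∧ p <+: l.drop i := by
  constructor
  · rintro ⟨s, u, rfl⟩
    have hp : 0 < p.length := List.length_pos_iff.mpr h
    refine ⟨s.length, by simp [List.length_append]; omega, u, ?_⟩
    rw [List.append_assoc, List.drop_left]
  · rintro ⟨i, _, r, hr⟩
    refine ⟨l.take i, r, ?_⟩
    rw [List.append_assoc, hr, List.take_append_drop]

-- membership in B's phrase set is membership in A's phrase list (as code-point lists)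
theorem mem_set_iff_mem_listA (s : List Char) :
    s ∈ yesPhraseSet ↔ ∃ p ∈ yesPhrasesA, p.toList = s := by
  rw [yesPhraseSet, PySem.Set.mem_ofList, List.mem_map]
  exact ⟨fun ⟨p, hp, h⟩ => ⟨p, hp, h⟩, fun ⟨p, hp, h⟩ => ⟨p, hp, h⟩⟩

-- every phrase of A is nonempty and its length occurs in B's length list
theorem phrase_len_mem : ∀ p ∈ yesPhrasesA, p.toList ≠ [] ∧ ((p.toList.length : Int)) ∈ yesLengths := by
  decide

-- every length in B's length list is positive
theorem lengths_pos : ∀ L ∈ yesLengths, 0 < L := by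
  decide

-- ===== VERDICT (by name: the statement is the Claim_ definition above) =====
theorem yes_spec : Claim_equal_yes := by
  intro text _
  unfold Spec_yes yes yes_alt
  set u := (PySem.Str.lower text).toList with hu
  have hslice : ∀ (i : ℕ) (L : Int), 0 ≤ L →
      PySem.Chars.slice u (some (i : Int)) (some ((i : Int) + L))
        = (u.drop i).take L.toNat := by
    intro i L h0
    have h1 : (0 : Int) ≤ (i : Int) := Int.natCast_nonneg i
    have h2 : (0 : Int) ≤ (i : Int) + L := by omega
    rw [PySem.Chars.slice_eq_listSlice, PySem.List.slice_toNat u h1 h2]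
    congr 1
    omega
  rcases hb : yesPhrasesA.any (fun phrase => PySem.Str.isIn phrase (PySem.Str.lower text)) with _ | _
  · symm; rw [List.any_eq_false]
    intro i hi
    rw [Bool.not_eq_true, List.any_eq_false]
    intro L hL
    rw [Bool.not_eq_true, Bool.and_eq_false_iff]
    right
    rcases hc : PySem.Set.contains yesPhraseSet
        (PySem.Chars.slice u (some (i : Int)) (some ((i : Int) + L))) with _ | _
    · rfl
    · exfalso
      have hpos := lengths_pos L hL
      have hc' := (PySem.Set.contains_iff _ _).mp hc
      obtain ⟨p, hpA, hps⟩ := (mem_set_iff_mem_listA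
        (PySem.Chars.slice u (some (i : Int)) (some ((i : Int) + L)))).mp hc'
      have hinf : p.toList <:+: u := by
        rw [hps, hslice i L (le_of_lt hpos)]
        exact ((u.drop i).take_prefix _).isInfix.trans (u.drop_suffix i).isInfix
      have hmem := (PySem.Chars.isIn_iff_infix p.toList u).mpr hinf
      rw [List.any_eq_false] at hb
      have hb' := hb p hpA
      rw [Bool.not_eq_true, PySem.Str.isIn_eq, ← hu] at hb'
      simp [hmem] at hb'
  · symm; rw [List.any_eq_true] at hb ⊢
    rcases hb with ⟨p, hp, hin⟩
    obtain ⟨hne, hLmem⟩ := phrase_len_mem p hp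
    rw [PySem.Str.isIn_eq, ← hu] at hin
    have hinf := (PySem.Chars.isIn_iff_infix _ _).mp hin
    rcases (infix_iff_exists_drop p.toList u hne).mp hinf with ⟨i, hi, hpre⟩
    refine ⟨i, List.mem_range.mpr hi, ?_⟩
    rw [List.any_eq_true]
    refine ⟨(p.toList.length : Int), hLmem, ?_⟩
    have hle : (i : Int) + (p.toList.length : Int) ≤ (u.length : Int) := by
      have := hpre.length_le
      rw [List.length_drop] at this
      omega
    rw [Bool.and_eq_true]
    refine ⟨by simpa using hle, ?_⟩
    rw [PySem.Set.contains_iff, mem_set_iff_mem_listA]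
    refine ⟨p, hp, ?_⟩
    rw [hslice i _ (by positivity), Int.toNat_natCast]
    exact List.prefix_iff_eq_take.mp hpre
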